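-- pv_equiv track=rewrite | github.com/liuxinyu95/AlgoXY | others/problems/DP/purchase/bestbuy.py | findbest
-- ===== SOURCE A (Python) =====
-- INF = 1000000
--
-- DELIVER_FEE = 8
--
-- def findbest(catalog, order):
--     def dfs(rest, sellers):
--         if rest == []:
--             return costof(catalog, order, sellers), sellers
--         prod = rest[0]
--         cost = (INF, [])
--         for i, seller in enumerate(catalog):
--             if prod in seller:
--                 cost = min(cost, dfs(rest[1:], sellers + [i]))
--         return cost
--     return dfs(order, [])
--
-- def costof(catalog, order, sellers):
--     return len(set(sellers)) * DELIVER_FEE + sum([catalog[s][o] for (o, s) in zip(order, sellers)])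
-- ===== SOURCE B (Python) =====
-- INF = 1000000
--
-- DELIVER_FEE = 8
--
-- def _cost(catalog, order, sellers):
--     return len(set(sellers)) * DELIVER_FEE + sum([catalog[s][o] for (o, s) in zip(order, sellers)])
--
-- def findbest(catalog, order):
--     # breadth-first cross-product enumeration instead of DFS recursion
--     assigns = [[]]
--     for prod in order:
--         if not assigns:
--             break  # no feasible assignment can exist any more
--         cand = [i for i, seller in enumerate(catalog) if prod in seller]
--         assigns = [a + [i] for a in assigns for i in cand]
--     best = (INF, [])
--     for a in assigns:
--         best = min(best, (_cost(catalog, order, a), a))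
--     return best
-- ===== Notes on version B (the rewrite author's own statement) =====
-- stated objective: alternative
-- what changed: Replaces the recursive DFS over the remaining order with an iterative breadth-first cross-product: per-product candidate-seller lists are combined into the explicit list of all full assignments, then a single fold takes the tuple-min of (cost, assignment) starting from (INF, []).
import Mathlib
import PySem

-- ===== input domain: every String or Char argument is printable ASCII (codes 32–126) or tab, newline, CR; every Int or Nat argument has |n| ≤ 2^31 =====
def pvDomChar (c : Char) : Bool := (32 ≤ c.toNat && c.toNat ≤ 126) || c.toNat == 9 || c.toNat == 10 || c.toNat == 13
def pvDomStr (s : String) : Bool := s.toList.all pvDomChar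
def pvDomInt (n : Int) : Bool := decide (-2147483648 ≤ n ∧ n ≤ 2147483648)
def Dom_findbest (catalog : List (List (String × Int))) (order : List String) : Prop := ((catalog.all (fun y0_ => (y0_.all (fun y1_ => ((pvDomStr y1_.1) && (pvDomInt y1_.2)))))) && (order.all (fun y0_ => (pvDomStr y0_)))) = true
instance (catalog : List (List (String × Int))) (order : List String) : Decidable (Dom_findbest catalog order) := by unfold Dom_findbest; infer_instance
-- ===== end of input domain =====

-- B replaces A's recursive DFS by an iterative cross-product enumeration of all assignments
-- followed by one min-fold (objective: alternative; same exponential cost).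

-- Python tuple/list comparison: lexicographic `<` on List Int (prefix is smaller)
def pvLtL : List Int → List Int → Bool
  | [], [] => false
  | [], _ :: _ => true
  | _ :: _, [] => false
  | a :: as, b :: bs => if a < b then true else if b < a then false else pvLtL as bs

-- Python `<` on (int, list) tuples
def pvLt (x y : Int × List Int) : Bool :=
  if x.1 < y.1 then true else if y.1 < x.1 then false else pvLtL x.2 y.2

-- Python min(x, y) on such tuples (keeps x on ties)
def pvMin (x y : Int × List Int) : Int × List Int := if pvLt y x then y else x

-- ===== PORT A =====
-- costof: len(set(sellers)) * DELIVER_FEE + sum(catalog[s][o] for (o, s) in zip(order, sellers))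
-- (catalog[s] / dict lookup use .getD defaults where Python would raise; never reached from findbest)
def costof (catalog : List (List (String × Int))) (order : List String) (sellers : List Int) : Int :=
  ((PySem.Set.ofList sellers).length : Int) * 8 +
    ((order.zip sellers).map (fun os =>
      PySem.Dict.getD (PySem.Dict.mk ((PySem.List.pyGet? catalog os.2).getD [])) os.1 0)).sum

-- the inner dfs(rest, sellers) closure of A
def pvDfs (catalog : List (List (String × Int))) (order : List String) :
    List String → List Int → Int × List Int
  | [], sellers => (costof catalog order sellers, sellers)
  | prod :: rest, sellers =>
    (PySem.List.enumerate catalog).foldl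
      (fun cost is =>
        if PySem.Dict.contains (PySem.Dict.mk is.2) prod then
          pvMin cost (pvDfs catalog order rest (sellers ++ [is.1]))
        else cost)
      (1000000, [])

def findbest (catalog : List (List (String × Int))) (order : List String) : Int × List Int :=
  pvDfs catalog order order []

-- ===== PORT B =====
-- _cost of Source B (same formula as A's costof helper)
def pvCostB (catalog : List (List (String × Int))) (order : List String) (sellers : List Int) : Int :=
  ((PySem.Set.ofList sellers).length : Int) * 8 +
    ((order.zip sellers).map (fun os =>
      PySem.Dict.getD (PySem.Dict.mk ((PySem.List.pyGet? catalog os.2).getD [])) os.1 0)).sum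

def findbest_alt (catalog : List (List (String × Int))) (order : List String) : Int × List Int :=
  let assigns :=
    order.foldl
      (fun assigns prod =>
        if assigns.isEmpty then assigns  -- Source B's `break`: the state never changes again
        else
          let cand := ((PySem.List.enumerate catalog).filter
            (fun is => PySem.Dict.contains (PySem.Dict.mk is.2) prod)).map (fun is => is.1)
          assigns.flatMap (fun a => cand.map (fun i => a ++ [i])))
      [[]]
  assigns.foldl (fun best a => pvMin best (pvCostB catalog order a, a)) (1000000, [])

-- ===== PRECONDITION & SPEC =====
def Spec_findbest (catalog : List (List (String × Int))) (order : List String) (out : Int × List Int) : Prop := out = findbest_alt catalog order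
instance (catalog : List (List (String × Int))) (order : List String) (out : Int × List Int) : Decidable (Spec_findbest catalog order out) := by unfold Spec_findbest; infer_instance

-- ===== CLAIM (what is proved, stated in full; the proofs are below) =====
def Claim_equal_findbest : Prop := ∀ (catalog : List (List (String × Int))) (order : List String), Dom_findbest catalog order → Spec_findbest catalog order (findbest catalog order)

-- ===== LEMMAS AND PROOFS =====

-- ===== strict-order facts for the Python tuple comparison =====
theorem pvLtL_irrefl (a : List Int) : pvLtL a a = false := by
  induction a with
  | nil => rfl
  | cons x xs ih => simp [pvLtL, ih]

theorem pvLtL_trans : ∀ (a b c : List Int), pvLtL a b = true → pvLtL b c = true → pvLtL a c = true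
  | [], _, _ :: _, _, _ => by simp [pvLtL]
  | [], b, [], _, h' => by cases b <;> simp [pvLtL] at h'
  | _ :: _, [], _, h, _ => by simp [pvLtL] at h
  | _ :: _, _ :: _, [], _, h' => by simp [pvLtL] at h'
  | a :: as, b :: bs, c :: cs, h, h' => by
    simp only [pvLtL] at h h' ⊢
    by_cases hab : a < b
    · by_cases hbc : b < c
      · simp [show a < c by omega]
      · rw [if_neg hbc] at h'
        by_cases hcb : c < b
        · rw [if_pos hcb] at h'; exact absurd h' (by simp)
        · simp [show a < c by omega]
    · rw [if_neg hab] at h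
      by_cases hba : b < a
      · rw [if_pos hba] at h; exact absurd h (by simp)
      · have hq : a = b := by omega
        subst hq
        rw [if_neg hba] at h
        by_cases hbc : a < c
        · simp [hbc]
        · rw [if_neg hbc] at h' ⊢
          by_cases hcb : c < a
          · rw [if_pos hcb] at h'; exact absurd h' (by simp)
          · rw [if_neg hcb] at h' ⊢
            exact pvLtL_trans as bs cs h h'

theorem pvLtL_total : ∀ (a b : List Int), pvLtL a b = false → pvLtL b a = true ∨ a = b
  | [], [], _ => Or.inr rfl
  | [], _ :: _, h => by simp [pvLtL] at h
  | _ :: _, [], _ => by simp [pvLtL]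
  | a :: as, b :: bs, h => by
    simp only [pvLtL] at h ⊢
    by_cases hab : a < b
    · rw [if_pos hab] at h; exact absurd h (by simp)
    · rw [if_neg hab] at h
      by_cases hba : b < a
      · simp [hba]
      · have hq : a = b := by omega
        subst hq
        rw [if_neg hba] at h ⊢
        rw [if_neg hab]
        rcases pvLtL_total as bs h with h1 | h1
        · exact Or.inl h1
        · exact Or.inr (by rw [h1])

theorem pvLt_irrefl (a : Int × List Int) : pvLt a a = false := by
  simp [pvLt, pvLtL_irrefl]

theorem pvLt_trans {a b c : Int × List Int} (h : pvLt a b = true) (h' : pvLt b c = true) : pvLt a c = true := by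
  simp only [pvLt] at h h' ⊢
  by_cases h1 : a.1 < b.1
  · by_cases h2 : b.1 < c.1
    · simp [show a.1 < c.1 by omega]
    · rw [if_neg h2] at h'
      by_cases h3 : c.1 < b.1
      · rw [if_pos h3] at h'; exact absurd h' (by simp)
      · simp [show a.1 < c.1 by omega]
  · rw [if_neg h1] at h
    by_cases h2 : b.1 < a.1
    · rw [if_pos h2] at h; exact absurd h (by simp)
    · rw [if_neg h2] at h
      by_cases h3 : b.1 < c.1
      · simp [show a.1 < c.1 by omega]
      · rw [if_neg h3] at h'
        by_cases h4 : c.1 < b.1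
        · rw [if_pos h4] at h'; exact absurd h' (by simp)
        · rw [if_neg h4] at h'
          rw [if_neg (show ¬ a.1 < c.1 by omega), if_neg (show ¬ c.1 < a.1 by omega)]
          exact pvLtL_trans _ _ _ h h'

theorem pvLt_total {a b : Int × List Int} (h : pvLt a b = false) : pvLt b a = true ∨ a = b := by
  simp only [pvLt] at h ⊢
  by_cases h1 : a.1 < b.1
  · rw [if_pos h1] at h; exact absurd h (by simp)
  · rw [if_neg h1] at h
    by_cases h2 : b.1 < a.1
    · simp [h2]
    · rw [if_neg h2] at h
      rw [if_neg h2, if_neg h1]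
      rcases pvLtL_total _ _ h with h3 | h3
      · exact Or.inl h3
      · exact Or.inr (Prod.ext (by omega) h3)

theorem pvLt_asymm {a b : Int × List Int} (h : pvLt a b = true) : pvLt b a = false := by
  by_contra hc
  have hc' : pvLt b a = true := by revert hc; cases pvLt b a <;> simp
  have := pvLt_trans h hc'
  rw [pvLt_irrefl] at this
  exact absurd this (by simp)

theorem pvLt_negtrans {a b c : Int × List Int} (h : pvLt b a = false) (h' : pvLt c b = false) :
    pvLt c a = false := by
  rcases pvLt_total h with h1 | h1 <;> rcases pvLt_total h' with h2 | h2
  · exact pvLt_asymm (pvLt_trans h1 h2)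
  · subst h2; exact h
  · subst h1; exact pvLt_asymm h2
  · subst h1; subst h2; exact pvLt_irrefl _

theorem pvMin_self (a : Int × List Int) : pvMin a a = a := by simp [pvMin]

theorem pvMin_assoc (a b c : Int × List Int) : pvMin (pvMin a b) c = pvMin a (pvMin b c) := by
  by_cases hba : pvLt b a = true
  · by_cases hcb : pvLt c b = true
    · simp [pvMin, hba, hcb, pvLt_trans hcb hba]
    · simp [pvMin, hba, hcb]
  · by_cases hcb : pvLt c b = true
    · simp [pvMin, hba, hcb]
    · have hba' : pvLt b a = false := by simpa using hba
      have hcb' : pvLt c b = false := by simpa using hcb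
      simp [pvMin, hba, hcb, pvLt_negtrans hba' hcb']

theorem pvMin_comm_of {z b : Int × List Int} (h : pvMin z b = b) : pvMin b z = b := by
  simp only [pvMin] at h ⊢
  by_cases h1 : pvLt b z = true
  · rw [if_neg (show ¬ pvLt z b = true by simp [pvLt_asymm h1])]
  · rw [if_neg h1] at h
    subst h
    simp [pvLt_irrefl]

-- min-fold homomorphism: a fold whose step commutes with pvMin distributes over pvMin in its seed
theorem foldl_pvMin_hom {α : Type} (step : (Int × List Int) → α → (Int × List Int))
    (h : ∀ a b x, step (pvMin a b) x = pvMin a (step b x)) :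
    ∀ (l : List α) (a b : Int × List Int), l.foldl step (pvMin a b) = pvMin a (l.foldl step b)
  | [], _, _ => rfl
  | x :: l, a, b => by
    simp only [List.foldl_cons, h]
    exact foldl_pvMin_hom step h l a (step b x)

-- ===== cross-product machinery =====
-- candidate seller indices for one product (A's guarded enumerate loop, B's list comprehension)
def pvCand (catalog : List (List (String × Int))) (prod : String) : List Int :=
  ((PySem.List.enumerate catalog).filter
    (fun is => PySem.Dict.contains (PySem.Dict.mk is.2) prod)).map (fun is => is.1)

-- all assignments (head product most significant), recursively
def pvSecs : List (List Int) → List (List Int)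
  | [] => [[]]
  | c :: cs => c.flatMap (fun i => (pvSecs cs).map (fun a => i :: a))

theorem pvCostB_eq : pvCostB = costof := rfl

-- B's iterative accumulation of assignments equals the recursive cross product
theorem cross_foldl (catalog : List (List (String × Int))) :
    ∀ (l : List String) (acc : List (List Int)),
      l.foldl (fun assigns prod =>
          assigns.flatMap (fun a => (pvCand catalog prod).map (fun i => a ++ [i]))) acc
        = acc.flatMap (fun a => (pvSecs (l.map (pvCand catalog))).map (fun s => a ++ s))
  | [], acc => by simp [pvSecs]
  | prod :: l, acc => by
    simp only [List.foldl_cons]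
    rw [cross_foldl catalog l]
    simp only [List.map_cons, pvSecs, List.flatMap_assoc, List.flatMap_map, List.map_flatMap,
      List.map_map]
    congr 1; funext a; congr 1; funext i; congr 1; funext s
    simp

-- a guarded min-fold over pairs is a min-fold over the filtered, projected list
theorem foldl_guard_map {α : Type} (p : α → Bool) (key : α → Int) (g : Int → Int × List Int) :
    ∀ (L : List α) (z : Int × List Int),
      L.foldl (fun c x => if p x then pvMin c (g (key x)) else c) z
        = ((L.filter p).map key).foldl (fun c i => pvMin c (g i)) z
  | [], _ => rfl
  | x :: L, z => by
    by_cases hp : p x <;> simp [hp, foldl_guard_map p key g L]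

theorem foldl_pvMin_absorb {α : Type} (g : α → Int × List Int) (l : List α) :
    pvMin (1000000, []) (l.foldl (fun c i => pvMin c (g i)) (1000000, []))
      = l.foldl (fun c i => pvMin c (g i)) (1000000, []) := by
  rw [← foldl_pvMin_hom (fun c i => pvMin c (g i)) (fun a b x => pvMin_assoc a b (g x)) l
    (1000000, []) (1000000, []), pvMin_self]

-- folding pvMin of pointwise values can be replaced by folding functions that agree after one pvMin
theorem foldl_min_lift {α : Type} (D : α → Int × List Int) (G : α → (Int × List Int) → Int × List Int)
    (z : Int × List Int)
    (hG : ∀ i a b, G i (pvMin a b) = pvMin a (G i b))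
    (hD : ∀ i, G i z = pvMin z (D i)) :
    ∀ (C : List α) (b : Int × List Int), pvMin z b = b →
      C.foldl (fun c i => pvMin c (D i)) b = C.foldl (fun c i => G i c) b
  | [], _, _ => rfl
  | i :: C, b, hb => by
    simp only [List.foldl_cons]
    have h1 : G i b = pvMin b (D i) := by
      conv_lhs => rw [← pvMin_comm_of hb]
      rw [hG, hD, ← pvMin_assoc, pvMin_comm_of hb]
    rw [h1]
    exact foldl_min_lift D G z hG hD C (pvMin b (D i)) (by rw [← pvMin_assoc, hb])

-- ===== the key invariant: dfs equals the min-fold over all completions =====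
theorem main_dfs (catalog : List (List (String × Int))) (order : List String) :
    ∀ (rest : List String) (sellers : List Int),
      pvMin (1000000, []) (pvDfs catalog order rest sellers)
        = (pvSecs (rest.map (pvCand catalog))).foldl
            (fun b a => pvMin b (costof catalog order (sellers ++ a), sellers ++ a)) (1000000, [])
  | [], sellers => by simp [pvDfs, pvSecs]
  | prod :: rest, sellers => by
    simp only [pvDfs, List.map_cons, pvSecs]
    have hguard := foldl_guard_map
      (fun is : Int × List (String × Int) => PySem.Dict.contains (PySem.Dict.mk is.2) prod)
      (fun is => is.1) (fun i => pvDfs catalog order rest (sellers ++ [i]))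
      (PySem.List.enumerate catalog) (1000000, [])
    simp only [hguard]
    rw [foldl_pvMin_absorb]
    -- right-hand side: fold over the flatMap = nested fold
    rw [List.foldl_flatMap]
    have hstep : ∀ (i : Int) (b : Int × List Int),
        ((pvSecs (rest.map (pvCand catalog))).map (fun a => i :: a)).foldl
            (fun b a => pvMin b (costof catalog order (sellers ++ a), sellers ++ a)) b
          = (pvSecs (rest.map (pvCand catalog))).foldl
              (fun b a => pvMin b (costof catalog order ((sellers ++ [i]) ++ a),
                (sellers ++ [i]) ++ a)) b := by
      intro i b
      rw [List.foldl_map]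
      simp [List.append_assoc]
    -- now compare the two folds over pvCand with foldl_min_lift
    have hfix : pvMin (1000000, ([] : List Int)) (1000000, ([] : List Int)) = (1000000, []) :=
      pvMin_self _
    refine (foldl_min_lift (fun i => pvDfs catalog order rest (sellers ++ [i]))
      (fun i b => (pvSecs (rest.map (pvCand catalog))).foldl
          (fun b a => pvMin b (costof catalog order ((sellers ++ [i]) ++ a),
            (sellers ++ [i]) ++ a)) b)
      (1000000, []) ?_ ?_ (pvCand catalog prod) (1000000, []) hfix).trans ?_
    · intro i a b
      dsimp only
      exact foldl_pvMin_hom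
        (fun b a => pvMin b (costof catalog order ((sellers ++ [i]) ++ a), (sellers ++ [i]) ++ a))
        (fun a b x => pvMin_assoc a b _) _ a b
    · intro i
      dsimp only
      exact (main_dfs catalog order rest (sellers ++ [i])).symm
    · dsimp only
      simp only [hstep]

-- a dfs value on a nonempty rest is already a fold from (INF, []), hence absorbed by it
theorem pvDfs_fix (catalog : List (List (String × Int))) (order : List String) (prod : String)
    (rest : List String) (sellers : List Int) :
    pvMin (1000000, []) (pvDfs catalog order (prod :: rest) sellers)
      = pvDfs catalog order (prod :: rest) sellers := by
  simp only [pvDfs]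
  have hguard := foldl_guard_map
    (fun is : Int × List (String × Int) => PySem.Dict.contains (PySem.Dict.mk is.2) prod)
    (fun is => is.1) (fun i => pvDfs catalog order rest (sellers ++ [i]))
    (PySem.List.enumerate catalog) (1000000, [])
  simp only [hguard]
  exact foldl_pvMin_absorb _ _

theorem findbest_alt_eq (catalog : List (List (String × Int))) (order : List String) :
    findbest_alt catalog order
      = (pvSecs (order.map (pvCand catalog))).foldl
          (fun b a => pvMin b (costof catalog order a, a)) (1000000, []) := by
  have hif : ∀ (c : List (List Int)) (f : List Int → List (List Int)),
      (if c.isEmpty then c else c.flatMap f) = c.flatMap f := by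
    intro c f; cases c <;> simp
  have hcross := cross_foldl catalog order [[]]
  simp only [pvCand] at hcross
  simp only [findbest_alt, pvCostB_eq, hif, hcross]
  simp

-- ===== VERDICT (by name: the statement is the Claim_ definition above) =====
theorem findbest_spec : Claim_equal_findbest := by
  intro catalog order _
  unfold Spec_findbest
  rw [findbest_alt_eq]
  cases order with
  | nil =>
    have h0 : costof catalog [] [] = 0 := by simp [costof]
    simp [findbest, pvDfs, pvSecs, h0, pvMin, pvLt]
  | cons p rest =>
    have hm := main_dfs catalog (p :: rest) (p :: rest) []
    simp only [List.nil_append] at hm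
    rw [← hm]
    exact (pvDfs_fix catalog (p :: rest) p rest []).symm
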